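-- pv_equiv track=rewrite | github.com/gychoi0916/Algorithm | Programmers_Kit/Level2/더맵게/더맵게.py | solution
-- ===== SOURCE A (Python) =====
-- import heapq
--
-- def solution(scoville, K):
--     answer = 0
--     scov_heap = []
--     for sco in scoville:
--         heapq.heappush(scov_heap,sco)
--
--     while scov_heap[0] < K:
--         if len(scov_heap) == 1:
--             return -1
--         tmp1 = heapq.heappop(scov_heap)
--         tmp2 = heapq.heappop(scov_heap)
--         heapq.heappush(scov_heap,tmp1+tmp2*2)
--         answer += 1
--     return answer
-- ===== SOURCE B (Python) =====
-- def solution(scoville, K):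
--     # Keep the foods in a fully sorted list; combine the two front elements
--     # and reinsert the mix at its binary-search position.
--     lst = sorted(scoville)
--     mixes = 0
--     while lst[0] < K:
--         if len(lst) == 1:
--             return -1
--         new = lst[0] + 2 * lst[1]
--         lst = lst[2:]
--         lo, hi = 0, len(lst)
--         while lo < hi:
--             mid = (lo + hi) // 2
--             if lst[mid] < new:
--                 lo = mid + 1
--             else:
--                 hi = mid
--         lst.insert(lo, new)
--         mixes += 1
--     return mixes
-- ===== Notes on version B (the rewrite author's own statement) =====
-- stated objective: alternative
-- what changed: Replaces heapq's binary min-heap (sift-up/sift-down array operations) by a fully sorted list: sort once, then each mix pops the two front elements and reinserts a+2*b at the position found by a hand-written lower-bound binary search.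
-- outside the precondition, e.g. on solution([], 5): A raises IndexError, B raises IndexError
import Mathlib
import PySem

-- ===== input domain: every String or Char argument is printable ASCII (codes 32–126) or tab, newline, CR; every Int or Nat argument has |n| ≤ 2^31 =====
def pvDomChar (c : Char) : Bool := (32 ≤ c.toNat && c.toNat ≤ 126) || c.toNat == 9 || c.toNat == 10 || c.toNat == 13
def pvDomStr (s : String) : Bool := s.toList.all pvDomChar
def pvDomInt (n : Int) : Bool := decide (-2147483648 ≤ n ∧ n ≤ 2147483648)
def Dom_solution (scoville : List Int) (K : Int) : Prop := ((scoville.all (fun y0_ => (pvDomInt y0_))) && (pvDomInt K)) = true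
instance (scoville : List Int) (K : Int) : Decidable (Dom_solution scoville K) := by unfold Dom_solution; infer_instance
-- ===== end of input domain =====

-- B replaces A's binary min-heap by a fully sorted list with binary-search reinsertion
-- of each mix; the return values agree on every nonempty scoville (Pre_ below).

-- tiny named termination facts (cited by the ports' decreasing_by)
theorem pv_dec_siftdown {startpos pos : Nat} (h : startpos < pos) : (pos - 1) / 2 < pos := by
  omega

theorem pv_dec_siftup {L childpos cp : Nat} (h : childpos < L) (hcp : childpos ≤ cp) :
    L - (2 * cp + 1) < L - childpos := by omega

theorem pv_dec_bsearch1 {lo hi : Nat} (h : lo < hi) : hi - ((lo + hi) / 2 + 1) < hi - lo := by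
  omega

theorem pv_dec_bsearch2 {lo hi : Nat} (h : lo < hi) : (lo + hi) / 2 - lo < hi - lo := by omega

theorem pv_dec_loopA {n : Nat} (h : ¬ (n + 1 == 1) = true) : n + 1 - 1 - 1 + 1 < n + 1 := by
  simp at h; omega

theorem pv_dec_loopB (t : List Int) (lo : Nat) (new : Int) (h : t ≠ []) :
    ((t.drop 1).insertIdx lo new).length < t.length + 1 := by
  have h1 := List.length_insertIdx_le_succ (l := t.drop 1) (i := lo) (x := new)
  have h2 := List.length_pos_of_ne_nil h
  simp only [List.length_drop] at h1
  omega

-- ===== PORT A =====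
-- Hand port of heapq (PySem has no heap). _siftdown's bubble-up while loop;
-- `newitem` is the value Python reads into `newitem` before the loop.  Exact for the
-- in-range positions these functions are ever called with inside `solution`.
def siftdownAux (heap : List Int) (startpos pos : Nat) (newitem : Int) : List Int :=
  if _h : startpos < pos then
    let parentpos := (pos - 1) / 2
    let parent := heap.getD parentpos 0
    if newitem < parent then
      siftdownAux (heap.set pos parent) startpos parentpos newitem
    else heap.set pos newitem
  else heap.set pos newitem
termination_by pos
decreasing_by exact pv_dec_siftdown _h

-- heapq._siftdown(heap, startpos, pos)
def siftdown (heap : List Int) (startpos pos : Nat) : List Int :=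
  siftdownAux heap startpos pos (heap.getD pos 0)

-- heapq.heappush: append, then sift the new last element up
def heappush (heap : List Int) (item : Int) : List Int :=
  siftdown (heap ++ [item]) 0 heap.length

-- heapq._siftup's descent while loop: move the hole at `pos` down along the
-- smaller-child path until it has no child; returns (array, final hole position).
def siftupAux (heap : List Int) (pos childpos : Nat) : List Int × Nat :=
  if h : childpos < heap.length then
    if childpos + 1 < heap.length ∧ ¬ (heap.getD childpos 0 < heap.getD (childpos + 1) 0) then
      siftupAux (heap.set pos (heap.getD (childpos + 1) 0)) (childpos + 1) (2 * (childpos + 1) + 1)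
    else
      siftupAux (heap.set pos (heap.getD childpos 0)) childpos (2 * childpos + 1)
  else (heap, pos)
termination_by heap.length - childpos
decreasing_by
  · simp only [List.length_set]; exact pv_dec_siftup h (Nat.le_succ childpos)
  · simp only [List.length_set]; exact pv_dec_siftup h (Nat.le_refl childpos)

-- heapq._siftup(heap, pos): descend, write newitem into the hole, bubble it up
def siftup (heap : List Int) (pos : Nat) : List Int :=
  let newitem := heap.getD pos 0
  let r := siftupAux heap pos (2 * pos + 1)
  siftdown (r.1.set r.2 newitem) pos r.2

-- heapq.heappop; callers in `solution` only pop nonempty heaps ([] returns junk)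
def heappop (heap : List Int) : Int × List Int :=
  match heap.getLast? with
  | none => (0, [])
  | some lastelt =>
    let rest := heap.dropLast
    if rest.isEmpty then (lastelt, [])
    else (rest.getD 0 0, siftup (rest.set 0 lastelt) 0)

-- length lemmas cited by loopA's decreasing_by
theorem length_siftdownAux (heap : List Int) (s p : Nat) (n : Int) :
    (siftdownAux heap s p n).length = heap.length := by
  fun_induction siftdownAux heap s p n <;> simp_all [List.length_set]

theorem length_siftupAux (heap : List Int) (p c : Nat) :
    (siftupAux heap p c).1.length = heap.length := by
  fun_induction siftupAux heap p c <;> simp_all [List.length_set]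

theorem length_heappush (heap : List Int) (x : Int) :
    (heappush heap x).length = heap.length + 1 := by
  simp [heappush, siftdown, length_siftdownAux]

theorem length_heappop (heap : List Int) :
    (heappop heap).2.length = heap.length - 1 := by
  unfold heappop
  match h : heap.getLast? with
  | none =>
    have : heap = [] := by simpa [List.getLast?_eq_none_iff] using h
    simp [this]
  | some lastelt =>
    have hne : heap ≠ [] := by rintro rfl; simp at h
    simp only
    split
    · rename_i he
      have h1 : heap.dropLast = [] := by simpa [List.isEmpty_iff] using he
      have h2 := heap.length_dropLast
      rw [h1] at h2
      simp only [List.length_nil] at h2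
      simpa using h2
    · simp [siftup, siftdown, length_siftdownAux, length_siftupAux, List.length_set,
        List.length_dropLast]

-- the while loop of A ([] : Python raises IndexError there; excluded by Pre_)
def loopA (heap : List Int) (K answer : Int) : Int :=
  match heap with
  | [] => 0
  | x :: t =>
    if x < K then
      if (x :: t).length == 1 then (-1)
      else
        let p1 := heappop (x :: t)
        let p2 := heappop p1.2
        loopA (heappush p2.2 (p1.1 + p2.1 * 2)) K (answer + 1)
    else answer
termination_by heap.length
decreasing_by
  rename_i hne
  simp only [length_heappush, length_heappop, List.length_cons]
  exact pv_dec_loopA hne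

def solution (scoville : List Int) (K : Int) : Int :=
  let scov_heap := scoville.foldl (fun h sco => heappush h sco) []
  loopA scov_heap K 0

-- ===== PORT B =====
-- Source B's hand-written lower-bound binary search (the inner `while lo < hi` loop)
def bsearchLoop (lst : List Int) (new : Int) (lo hi : Nat) : Nat :=
  if _h : lo < hi then
    let mid := (lo + hi) / 2
    if lst.getD mid 0 < new then bsearchLoop lst new (mid + 1) hi
    else bsearchLoop lst new lo mid
  else lo
termination_by hi - lo
decreasing_by
  · exact pv_dec_bsearch1 _h
  · exact pv_dec_bsearch2 _h

-- Source B's outer while loop over the sorted list ([] : Python raises IndexError, outside Pre_)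
def loopB (lst : List Int) (K mixes : Int) : Int :=
  match lst with
  | [] => 0
  | x :: t =>
    if x < K then
      if (x :: t).length == 1 then (-1)
      else
        let new := (x :: t).getD 0 0 + 2 * (x :: t).getD 1 0
        let l2 := (x :: t).drop 2
        let lo := bsearchLoop l2 new 0 l2.length
        loopB (l2.insertIdx lo new) K (mixes + 1)
    else mixes
termination_by lst.length
decreasing_by
  rename_i hne
  exact pv_dec_loopB t lo new (by rintro rfl; simp at hne)

def solution_alt (scoville : List Int) (K : Int) : Int :=
  loopB (PySem.List.sorted scoville (fun x => x) false) K 0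

-- ===== PRECONDITION & SPEC =====
-- Pre_ excludes exactly the empty list, on which Python A raises IndexError at heap[0]
-- (and B likewise raises at lst[0]).
def Pre_solution (scoville : List Int) (_K : Int) : Prop := scoville ≠ []
instance (scoville : List Int) (K : Int) : Decidable (Pre_solution scoville K) := by
  unfold Pre_solution; infer_instance
def pvWitness_solution : List Int × Int := ([1, 2, 3, 9, 10, 12], 7)

def Spec_solution (scoville : List Int) (K : Int) (out : Int) : Prop := out = solution_alt scoville K
instance (scoville : List Int) (K : Int) (out : Int) : Decidable (Spec_solution scoville K out) := by
  unfold Spec_solution; infer_instance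

-- ===== CLAIM (what is proved, stated in full; the proofs are below) =====
def Claim_equal_solution : Prop := ∀ (scoville : List Int) (K : Int), Dom_solution scoville K → Pre_solution scoville K → Spec_solution scoville K (solution scoville K)

-- ===== LEMMAS AND PROOFS =====

-- getD bookkeeping
theorem getD_eq' (l : List Int) (i : Nat) (h : i < l.length) : l.getD i 0 = l[i] :=
  List.getD_eq_getElem l 0 h

theorem getD_set_self' (l : List Int) (i : Nat) (a : Int) (h : i < l.length) :
    (l.set i a).getD i 0 = a := by
  rw [getD_eq' _ _ (by simpa using h)]
  simp [List.getElem_set_self]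

theorem getD_set_ne' (l : List Int) (i j : Nat) (a : Int) (h : i ≠ j) :
    (l.set i a).getD j 0 = l.getD j 0 := by
  simp [List.getD_eq_getElem?_getD, List.getElem?_set_ne h]

theorem set_getD_self' (l : List Int) (i : Nat) (h : i < l.length) :
    l.set i (l.getD i 0) = l := by
  rw [getD_eq' _ _ h]; exact List.set_getElem_self h

-- swapping two positions is a permutation
theorem cons_getD_set_perm (t : List Int) (k : Nat) (x : Int) (h : k < t.length) :
    (t.getD k 0 :: t.set k x).Perm (x :: t) := by
  induction t generalizing k with
  | nil => simp at h
  | cons a s ih =>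
    cases k with
    | zero => simpa using List.Perm.swap x a s
    | succ k =>
      have hk : k < s.length := by simpa using h
      exact (List.Perm.swap a (s.getD k 0) _).trans
        (((ih k hk).cons a).trans (List.Perm.swap x a s))

theorem set_set_perm (l : List Int) (i j : Nat) (hi : i < l.length) (hj : j < l.length) :
    ((l.set i (l.getD j 0)).set j (l.getD i 0)).Perm l := by
  induction l generalizing i j with
  | nil => simp at hi
  | cons a t ih =>
    cases i with
    | zero =>
      cases j with
      | zero => simp
      | succ m =>
        have hm : m < t.length := by simpa using hj
        simpa using cons_getD_set_perm t m a hm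
    | succ k =>
      cases j with
      | zero =>
        have hk : k < t.length := by simpa using hi
        simpa using cons_getD_set_perm t k a hk
      | succ m =>
        have hk : k < t.length := by simpa using hi
        have hm : m < t.length := by simpa using hj
        simpa using (ih k m hk hm).cons a

-- heap order predicate over the array encoding
def IsHeap (l : List Int) : Prop :=
  ∀ i c : Nat, c < l.length → (c = 2 * i + 1 ∨ c = 2 * i + 2) → l.getD i 0 ≤ l.getD c 0

theorem root_min (l : List Int) (hh : IsHeap l) : ∀ i, i < l.length → l.getD 0 0 ≤ l.getD i 0 := by
  intro i
  induction i using Nat.strong_induction_on with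
  | _ i ih =>
    intro hi
    rcases Nat.eq_zero_or_pos i with h0 | h0
    · subst h0; exact le_refl _
    · have hp : (i - 1) / 2 < i := by omega
      exact le_trans (ih _ hp (lt_trans hp hi)) (hh _ i hi (by omega))

-- invariant for the bubble-up phase: v is a heap except possibly at the edge into pos,
-- and pos's parent is already ≤ pos's children
def SInv (v : List Int) (pos : Nat) : Prop :=
  (∀ i c : Nat, c < v.length → (c = 2 * i + 1 ∨ c = 2 * i + 2) → c ≠ pos →
      v.getD i 0 ≤ v.getD c 0) ∧
  (0 < pos → ∀ c : Nat, c < v.length → (c = 2 * pos + 1 ∨ c = 2 * pos + 2) →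
      v.getD ((pos - 1) / 2) 0 ≤ v.getD c 0)

theorem siftdownAux_spec (n : Int) : ∀ (pos : Nat) (l : List Int), pos < l.length →
    SInv (l.set pos n) pos →
    IsHeap (siftdownAux l 0 pos n) ∧ (siftdownAux l 0 pos n).Perm (l.set pos n) := by
  intro pos
  induction pos using Nat.strong_induction_on with
  | _ pos IH =>
    intro l hpos hInv
    rw [siftdownAux]
    by_cases h0 : 0 < pos
    · simp only [dif_pos h0]
      by_cases hlt : n < l.getD ((pos - 1) / 2) 0
      · rw [if_pos hlt]
        have hpplt : (pos - 1) / 2 < pos := by omega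
        have hppl : (pos - 1) / 2 < l.length := lt_trans hpplt hpos
        have hSI : SInv ((l.set pos (l.getD ((pos - 1) / 2) 0)).set ((pos - 1) / 2) n)
            ((pos - 1) / 2) := by
          have hlenw : ((l.set pos (l.getD ((pos - 1) / 2) 0)).set ((pos - 1) / 2) n).length
              = l.length := by simp
          have hw : ∀ k : Nat, k ≠ pos → k ≠ (pos - 1) / 2 →
              ((l.set pos (l.getD ((pos - 1) / 2) 0)).set ((pos - 1) / 2) n).getD k 0
                = (l.set pos n).getD k 0 := by
            intro k h1 h2
            rw [getD_set_ne' _ _ _ _ (Ne.symm h2), getD_set_ne' _ _ _ _ (Ne.symm h1),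
              getD_set_ne' _ _ _ _ (Ne.symm h1)]
          have hwpos : ((l.set pos (l.getD ((pos - 1) / 2) 0)).set ((pos - 1) / 2) n).getD pos 0
              = l.getD ((pos - 1) / 2) 0 := by
            rw [getD_set_ne' _ _ _ _ (by omega), getD_set_self' l pos _ hpos]
          have hwpp : ((l.set pos (l.getD ((pos - 1) / 2) 0)).set ((pos - 1) / 2) n).getD
              ((pos - 1) / 2) 0 = n :=
            getD_set_self' _ _ _ (by simpa using hppl)
          have hvpp : (l.set pos n).getD ((pos - 1) / 2) 0 = l.getD ((pos - 1) / 2) 0 :=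
            getD_set_ne' l pos _ n (by omega)
          constructor
          · intro i c hc hcc hcpp
            rw [hlenw] at hc
            have hc' : c < (l.set pos n).length := by simpa using hc
            by_cases hcpos : c = pos
            · have hi : i = (pos - 1) / 2 := by omega
              subst hi
              rw [hcpos, hwpp, hwpos]
              exact le_of_lt hlt
            · by_cases hipos : i = pos
              · subst hipos
                rw [hwpos, hw c hcpos hcpp]
                have h2 := hInv.2 h0 c hc' hcc
                rwa [hvpp] at h2
              · by_cases hipp : i = (pos - 1) / 2
                · subst hipp
                  rw [hwpp, hw c hcpos hcpp]
                  have h2 := hInv.1 _ c hc' hcc hcpos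
                  rw [hvpp] at h2
                  exact le_trans (le_of_lt hlt) h2
                · rw [hw i hipos hipp, hw c hcpos hcpp]
                  exact hInv.1 i c hc' hcc hcpos
          · intro hpp0 c hc hcc
            rw [hlenw] at hc
            have hc' : c < (l.set pos n).length := by simpa using hc
            have hgp1 : ((pos - 1) / 2 - 1) / 2 ≠ pos := by omega
            have hgp2 : ((pos - 1) / 2 - 1) / 2 ≠ (pos - 1) / 2 := by omega
            rw [hw _ hgp1 hgp2]
            by_cases hcpos : c = pos
            · rw [hcpos, hwpos]
              have h2 := hInv.1 (((pos - 1) / 2 - 1) / 2) ((pos - 1) / 2)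
                (by simpa using hppl) (by omega) (by omega)
              rwa [hvpp] at h2
            · rw [hw c hcpos (by omega)]
              have h2 := hInv.1 (((pos - 1) / 2 - 1) / 2) ((pos - 1) / 2)
                (by simpa using hppl) (by omega) (by omega)
              rw [hvpp] at h2
              have h3 := hInv.1 ((pos - 1) / 2) c hc' hcc hcpos
              rw [hvpp] at h3
              exact le_trans h2 h3
        obtain ⟨hH, hP⟩ := IH ((pos - 1) / 2) hpplt (l.set pos (l.getD ((pos - 1) / 2) 0))
          (by simpa using hppl) hSI
        refine ⟨hH, hP.trans ?_⟩
        have key : (l.set pos (l.getD ((pos - 1) / 2) 0)).set ((pos - 1) / 2) n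
            = ((l.set pos n).set pos ((l.set pos n).getD ((pos - 1) / 2) 0)).set
                ((pos - 1) / 2) ((l.set pos n).getD pos 0) := by
          rw [getD_set_ne' l pos ((pos - 1) / 2) n (by omega),
            getD_set_self' l pos n hpos, List.set_set]
        rw [key]
        exact set_set_perm (l.set pos n) pos ((pos - 1) / 2)
          (by simpa using hpos) (by simpa using hppl)
      · rw [if_neg hlt]
        refine ⟨?_, List.Perm.refl _⟩
        intro i c hc hcc
        by_cases hcpos : c = pos
        · have hi : i = (pos - 1) / 2 := by omega
          subst hi
          rw [hcpos, getD_set_self' l pos n hpos,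
            getD_set_ne' l pos ((pos - 1) / 2) n (by omega)]
          exact not_lt.mp hlt
        · exact hInv.1 i c hc hcc hcpos
    · rw [dif_neg h0]
      refine ⟨?_, List.Perm.refl _⟩
      intro i c hc hcc
      exact hInv.1 i c hc hcc (by omega)

-- invariant for the descent phase: l is a heap except at edges touching the hole pos,
-- and the hole's parent is ≤ the hole's children
def DInv (l : List Int) (pos : Nat) : Prop :=
  (∀ i c : Nat, c < l.length → (c = 2 * i + 1 ∨ c = 2 * i + 2) → i ≠ pos → c ≠ pos →
      l.getD i 0 ≤ l.getD c 0) ∧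
  (0 < pos → ∀ c : Nat, c < l.length → (c = 2 * pos + 1 ∨ c = 2 * pos + 2) →
      l.getD ((pos - 1) / 2) 0 ≤ l.getD c 0)

-- one descent step of _siftup: swap the hole with its smaller child
theorem siftup_step (l : List Int) (pos cp : Nat) (hpos : pos < l.length) (hcp : cp < l.length)
    (hchild : cp = 2 * pos + 1 ∨ cp = 2 * pos + 2)
    (hmin : ∀ s : Nat, (s = 2 * pos + 1 ∨ s = 2 * pos + 2) → s < l.length →
      l.getD cp 0 ≤ l.getD s 0)
    (hD : DInv l pos) :
    DInv (l.set pos (l.getD cp 0)) cp ∧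
    ∀ m : Int, ((l.set pos (l.getD cp 0)).set cp m).Perm (l.set pos m) := by
  have hppos : pos < cp := by omega
  have hset_ne : ∀ k : Nat, k ≠ pos → (l.set pos (l.getD cp 0)).getD k 0 = l.getD k 0 :=
    fun k hk => getD_set_ne' l pos k _ (Ne.symm hk)
  have hset_pos : (l.set pos (l.getD cp 0)).getD pos 0 = l.getD cp 0 :=
    getD_set_self' l pos _ hpos
  refine ⟨⟨?_, ?_⟩, ?_⟩
  · intro i c hc hcc hicp hccp
    have hc' : c < l.length := by simpa using hc
    by_cases hcpos : c = pos
    · have hi : i = (pos - 1) / 2 := by omega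
      have h0 : 0 < pos := by omega
      subst hi
      rw [hcpos, hset_pos, hset_ne _ (by omega)]
      exact hD.2 h0 cp hcp hchild
    · by_cases hipos : i = pos
      · subst hipos
        rw [hset_pos, hset_ne c hcpos]
        exact hmin c (by omega) hc'
      · rw [hset_ne i hipos, hset_ne c hcpos]
        exact hD.1 i c hc' hcc hipos hcpos
  · intro _ c hc hcc
    have hc' : c < l.length := by simpa using hc
    have hpar : (cp - 1) / 2 = pos := by omega
    rw [hpar, hset_pos, hset_ne c (by omega)]
    exact hD.1 cp c hc' hcc (by omega) (by omega)
  · intro m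
    have key : (l.set pos (l.getD cp 0)).set cp m
        = ((l.set pos m).set pos ((l.set pos m).getD cp 0)).set cp
            ((l.set pos m).getD pos 0) := by
      rw [getD_set_ne' l pos cp m (by omega), getD_set_self' l pos m hpos, List.set_set]
    rw [key]
    exact set_set_perm (l.set pos m) pos cp (by simpa using hpos) (by simpa using hcp)

theorem siftupAux_spec : ∀ (k : Nat) (l : List Int) (pos childpos : Nat),
    l.length - childpos ≤ k → childpos = 2 * pos + 1 → pos < l.length → DInv l pos →
    DInv (siftupAux l pos childpos).1 (siftupAux l pos childpos).2 ∧
    (siftupAux l pos childpos).2 < l.length ∧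
    l.length ≤ 2 * (siftupAux l pos childpos).2 + 1 ∧
    ∀ m : Int, ((siftupAux l pos childpos).1.set (siftupAux l pos childpos).2 m).Perm
      (l.set pos m) := by
  intro k
  induction k with
  | zero =>
    intro l pos childpos hk hcp hpos hD
    have hno : ¬ childpos < l.length := by omega
    rw [siftupAux, dif_neg hno]
    exact ⟨hD, hpos, by omega, fun m => List.Perm.refl _⟩
  | succ k ih =>
    intro l pos childpos hk hcp hpos hD
    rw [siftupAux]
    by_cases h : childpos < l.length
    · rw [dif_pos h]
      by_cases hsel : childpos + 1 < l.length ∧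
          ¬ (l.getD childpos 0 < l.getD (childpos + 1) 0)
      · rw [if_pos hsel]
        obtain ⟨hD', hPerm'⟩ := siftup_step l pos (childpos + 1) hpos hsel.1 (by omega)
          (by
            intro s hs hsl
            rcases hs with hs | hs
            · rw [hs, ← hcp]; exact le_of_not_gt hsel.2
            · rw [hs, ← (by omega : childpos + 1 = 2 * pos + 2)])
          hD
        obtain ⟨h1, h2, h3, h4⟩ := ih (l.set pos (l.getD (childpos + 1) 0)) (childpos + 1)
          (2 * (childpos + 1) + 1) (by simp; omega) rfl (by simpa using hsel.1) hD'
        refine ⟨h1, by simpa using h2, by simpa using h3, fun m => (h4 m).trans (hPerm' m)⟩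
      · rw [if_neg hsel]
        obtain ⟨hD', hPerm'⟩ := siftup_step l pos childpos hpos h (by omega)
          (by
            intro s hs hsl
            rcases hs with hs | hs
            · rw [hs, ← hcp]
            · rw [hs, ← (by omega : childpos + 1 = 2 * pos + 2)]
              rcases Decidable.em (childpos + 1 < l.length) with h2 | h2
              · exact le_of_lt (by
                  by_contra hcon
                  exact hsel ⟨h2, fun hlt2 => (by omega : False)⟩)
              · omega)
          hD
        obtain ⟨h1, h2, h3, h4⟩ := ih (l.set pos (l.getD childpos 0)) childpos
          (2 * childpos + 1) (by simp; omega) rfl (by simpa using h) hD'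
        refine ⟨h1, by simpa using h2, by simpa using h3, fun m => (h4 m).trans (hPerm' m)⟩
    · rw [dif_neg h]
      exact ⟨hD, hpos, by omega, fun m => List.Perm.refl _⟩

theorem getD_append_left' (h : List Int) (x : Int) (i : Nat) (hi : i < h.length) :
    (h ++ [x]).getD i 0 = h.getD i 0 := by
  rw [getD_eq' _ _ (by simp; omega), getD_eq' _ _ hi]
  exact List.getElem_append_left hi

theorem siftup_zero_spec (l : List Int) (h0 : 0 < l.length) (hD : DInv l 0) :
    IsHeap (siftup l 0) ∧ (siftup l 0).Perm l := by
  obtain ⟨hD', hlt, hle, hperm⟩ :=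
    siftupAux_spec l.length l 0 1 (by omega) (by norm_num) h0 hD
  unfold siftup siftdown
  simp only
  have hr1len : (siftupAux l 0 (2 * 0 + 1)).1.length = l.length := length_siftupAux l 0 _
  have h201 : (2 * 0 + 1 : Nat) = 1 := by norm_num
  rw [h201] at hr1len
  have hget : ((siftupAux l 0 1).1.set (siftupAux l 0 1).2
      (l.getD 0 0)).getD (siftupAux l 0 1).2 0 = l.getD 0 0 :=
    getD_set_self' _ _ _ (by omega)
  rw [h201, hget]
  have hSI : SInv (((siftupAux l 0 1).1.set (siftupAux l 0 1).2 (l.getD 0 0)).set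
      (siftupAux l 0 1).2 (l.getD 0 0)) (siftupAux l 0 1).2 := by
    rw [List.set_set]
    constructor
    · intro i c hc hcc hcr
      have hc' : c < l.length := by simpa [hr1len] using hc
      have hir : i ≠ (siftupAux l 0 1).2 := by omega
      rw [getD_set_ne' _ _ _ _ (Ne.symm hir), getD_set_ne' _ _ _ _ (Ne.symm hcr)]
      exact hD'.1 i c (by omega) hcc hir hcr
    · intro _ c hc hcc
      have hc' : c < l.length := by simpa [hr1len] using hc
      omega
  obtain ⟨hH, hP⟩ := siftdownAux_spec (l.getD 0 0) (siftupAux l 0 1).2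
    ((siftupAux l 0 1).1.set (siftupAux l 0 1).2 (l.getD 0 0))
    (by simp; omega) hSI
  refine ⟨hH, hP.trans ?_⟩
  rw [List.set_set]
  exact (hperm (l.getD 0 0)).trans (by rw [set_getD_self' l 0 h0])

theorem heappush_spec (h : List Int) (x : Int) (hh : IsHeap h) :
    IsHeap (heappush h x) ∧ (heappush h x).Perm (x :: h) := by
  unfold heappush siftdown
  have hx : (h ++ [x]).getD h.length 0 = x := by
    rw [getD_eq' _ _ (by simp)]
    simp
  have hself : (h ++ [x]).set h.length x = h ++ [x] := by
    nth_rewrite 2 [← hx]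
    exact set_getD_self' _ _ (by simp)
  rw [hx]
  have hSI : SInv ((h ++ [x]).set h.length x) h.length := by
    rw [hself]
    constructor
    · intro i c hc hcc hcl
      have hc' : c < h.length := by simp at hc; omega
      have hi' : i < h.length := by omega
      rw [getD_append_left' h x c hc', getD_append_left' h x i hi']
      exact hh i c hc' hcc
    · intro _ c hc hcc
      simp at hc; omega
  obtain ⟨hH, hP⟩ := siftdownAux_spec x h.length (h ++ [x]) (by simp) hSI
  exact ⟨hH, (hP.trans (by rw [hself])).trans (List.perm_append_singleton x h)⟩

theorem heappop_spec (heap : List Int) (hh : IsHeap heap) (hne : heap ≠ []) :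
    (heappop heap).1 = heap.getD 0 0 ∧ IsHeap (heappop heap).2 ∧
    heap.Perm ((heappop heap).1 :: (heappop heap).2) := by
  have hlast : heap.getLast? = some (heap.getLast hne) := List.getLast?_eq_some_getLast hne
  unfold heappop
  rw [hlast]
  simp only
  by_cases hre : heap.dropLast.isEmpty
  · have hdl : heap.dropLast = [] := by simpa [List.isEmpty_iff] using hre
    have hlen1 : heap.length = 1 := by
      have h1 := heap.length_dropLast
      rw [hdl] at h1
      have h2 := List.length_pos_of_ne_nil hne
      simp at h1; omega
    obtain ⟨a, rfl⟩ := List.length_eq_one_iff.mp hlen1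
    refine ⟨by simp [List.getLast], by intro i c hc _; simp at hc, by simp [List.getLast]⟩
  · rw [if_neg hre]
    have hrne : heap.dropLast ≠ [] := by simpa [List.isEmpty_iff] using hre
    have heq : heap.dropLast ++ [heap.getLast hne] = heap := List.dropLast_concat_getLast hne
    have hrpos : 0 < heap.dropLast.length := List.length_pos_of_ne_nil hrne
    have hD : DInv (heap.dropLast.set 0 (heap.getLast hne)) 0 := by
      constructor
      · intro i c hc hcc hi0 hc0
        have hc' : c < heap.dropLast.length := by simpa using hc
        rw [getD_set_ne' _ _ _ _ (Ne.symm hc0), getD_set_ne' _ _ _ _ (Ne.symm hi0)]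
        have hlld := heap.length_dropLast
        have hgi : heap.dropLast.getD i 0 = heap.getD i 0 := by
          rw [getD_eq' _ _ (by omega), getD_eq' _ _ (by omega)]
          exact List.getElem_dropLast ..
        have hgc : heap.dropLast.getD c 0 = heap.getD c 0 := by
          rw [getD_eq' _ _ hc', getD_eq' _ _ (by omega)]
          exact List.getElem_dropLast ..
        rw [hgi, hgc]
        exact hh i c (by omega) hcc
      · intro h0 _ _ _
        exact absurd h0 (lt_irrefl 0)
    obtain ⟨hH, hP⟩ := siftup_zero_spec (heap.dropLast.set 0 (heap.getLast hne))
      (by simpa using hrpos) hD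
    obtain ⟨r0, rt, hrest⟩ := List.exists_cons_of_ne_nil hrne
    have hlld := heap.length_dropLast
    have hfst : heap.dropLast.getD 0 0 = heap.getD 0 0 := by
      rw [getD_eq' _ _ hrpos, getD_eq' _ _ (by omega)]
      exact List.getElem_dropLast ..
    refine ⟨hfst, hH, ?_⟩
    show heap.Perm (heap.dropLast.getD 0 0 :: siftup (heap.dropLast.set 0 (heap.getLast hne)) 0)
    have hset2 : (heap.dropLast.set 0 (heap.getLast hne)).Perm (heap.getLast hne :: rt) := by
      rw [hrest]
      exact List.Perm.refl _
    have hchain : heap.Perm (r0 :: (heap.getLast hne :: rt)) := by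
      conv_lhs => rw [← heq, hrest]
      exact (List.perm_append_singleton _ rt).cons r0
    have hg0 : heap.dropLast.getD 0 0 = r0 := by rw [hrest]; rfl
    rw [hg0]
    exact hchain.trans (((hP.trans hset2).symm).cons r0)

-- B-side facts
theorem pairwise_getD_mono (l : List Int) (hp : l.Pairwise (· ≤ ·)) (i j : Nat)
    (hij : i ≤ j) (hj : j < l.length) : l.getD i 0 ≤ l.getD j 0 := by
  rcases Nat.lt_or_ge i j with h | h
  · rw [getD_eq' _ _ (lt_trans h hj), getD_eq' _ _ hj]
    exact List.pairwise_iff_getElem.mp hp i j _ hj h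
  · have : i = j := by omega
    subst this; exact le_refl _

theorem bsearchLoop_le (lst : List Int) (x : Int) (lo hi : Nat) (h : lo ≤ hi) :
    bsearchLoop lst x lo hi ≤ hi := by
  fun_induction bsearchLoop lst x lo hi <;> omega

theorem bsearchLoop_spec (l : List Int) (x : Int) (hp : l.Pairwise (· ≤ ·)) :
    ∀ (k lo hi : Nat), hi - lo ≤ k → lo ≤ hi → hi ≤ l.length →
    (∀ i, i < lo → l.getD i 0 < x) → (∀ i, hi ≤ i → i < l.length → x ≤ l.getD i 0) →
    (∀ i, i < bsearchLoop l x lo hi → l.getD i 0 < x) ∧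
    (∀ i, bsearchLoop l x lo hi ≤ i → i < l.length → x ≤ l.getD i 0) := by
  intro k
  induction k with
  | zero =>
    intro lo hi hk hlohi hhi hlt hge
    have hno : ¬ lo < hi := by omega
    rw [bsearchLoop, dif_neg hno]
    have he : hi = lo := by omega
    exact ⟨hlt, by rw [← he]; exact hge⟩
  | succ k ih =>
    intro lo hi hk hlohi hhi hlt hge
    rw [bsearchLoop]
    by_cases h : lo < hi
    · simp only [dif_pos h]
      by_cases hc : l.getD ((lo + hi) / 2) 0 < x
      · simp only [if_pos hc]
        apply ih ((lo + hi) / 2 + 1) hi (by omega) (by omega) hhi ?_ hge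
        intro i hi2
        rcases Nat.lt_or_ge i lo with h2 | h2
        · exact hlt i h2
        · exact lt_of_le_of_lt
            (pairwise_getD_mono l hp i ((lo + hi) / 2) (by omega) (by omega)) hc
      · simp only [if_neg hc]
        apply ih lo ((lo + hi) / 2) (by omega) (by omega) (by omega) hlt
        intro i h1 h2
        exact le_trans (not_lt.mp hc) (pairwise_getD_mono l hp ((lo + hi) / 2) i h1 h2)
    · rw [dif_neg h]
      have he : hi = lo := by omega
      exact ⟨hlt, by rw [← he]; exact hge⟩

theorem insertIdx_sorted_perm (l : List Int) (x : Int) (r : Nat) (hr : r ≤ l.length)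
    (hlt : ∀ i, i < r → l.getD i 0 < x) (hge : ∀ i, r ≤ i → i < l.length → x ≤ l.getD i 0)
    (hp : l.Pairwise (· ≤ ·)) :
    (l.insertIdx r x).Pairwise (· ≤ ·) ∧ (l.insertIdx r x).Perm (x :: l) := by
  constructor
  · rw [List.pairwise_iff_getElem]
    intro i j hi hj hij
    have hlen : (l.insertIdx r x).length = l.length + 1 :=
      List.length_insertIdx_of_le_length hr x
    rw [hlen] at hi hj
    have hgetlt : ∀ (p : Nat) (hp2 : p < r), (l.insertIdx r x)[p]'(by omega) = l[p]'(by omega) := by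
      intro p hp2
      exact List.getElem_insertIdx_of_lt (by omega) _
    have hgetself : (l.insertIdx r x)[r]'(by omega) = x := by
      exact List.getElem_insertIdx_self (by omega)
    have hgetgt : ∀ (p : Nat) (hp2 : r < p) (hp3 : p < l.length + 1),
        (l.insertIdx r x)[p]'(by omega) = l[p-1]'(by omega) := by
      intro p hp2 hp3
      exact List.getElem_insertIdx_of_gt hp2 _
    rcases Nat.lt_trichotomy j r with hjr | hjr | hjr
    · rw [hgetlt i (by omega), hgetlt j hjr]
      exact List.pairwise_iff_getElem.mp hp i j _ _ hij
    · subst hjr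
      rw [hgetlt i hij, hgetself]
      exact le_of_lt (by rw [← getD_eq' l i (by omega)]; exact hlt i hij)
    · rw [hgetgt j hjr hj]
      rcases Nat.lt_trichotomy i r with hir | hir | hir
      · rw [hgetlt i hir]
        rw [← getD_eq' l i (by omega), ← getD_eq' l (j-1) (by omega)]
        exact pairwise_getD_mono l hp i (j-1) (by omega) (by omega)
      · subst hir
        rw [hgetself, ← getD_eq' l (j-1) (by omega)]
        exact hge (j-1) (by omega) (by omega)
      · rw [hgetgt i hir (by omega)]
        rw [← getD_eq' l (i-1) (by omega), ← getD_eq' l (j-1) (by omega)]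
        exact pairwise_getD_mono l hp (i-1) (j-1) (by omega) (by omega)
  · exact List.perm_insertIdx x l hr

-- the two loops agree on permuted states: heap on the left, sorted list on the right
-- a heap and a sorted list over the same multiset expose the same minimum
theorem min_match (h : List Int) (c : Int) (lt2 : List Int) (hH : IsHeap h)
    (hperm : h.Perm (c :: lt2)) (hp : (c :: lt2).Pairwise (· ≤ ·)) : h.getD 0 0 = c := by
  have hlen : 0 < h.length := by
    have := hperm.length_eq
    simp at this; omega
  have h1 : c ∈ h := hperm.mem_iff.mpr (List.mem_cons_self ..)
  obtain ⟨j, hj, hbj⟩ := List.getElem_of_mem h1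
  have hle1 : h.getD 0 0 ≤ c := by
    rw [← hbj, ← getD_eq' _ _ hj]
    exact root_min h hH j hj
  have h2 : h.getD 0 0 ∈ h := by
    rw [getD_eq' _ _ hlen]
    exact List.getElem_mem hlen
  have h3 : h.getD 0 0 ∈ c :: lt2 := hperm.subset h2
  have hge : c ≤ h.getD 0 0 := by
    rcases List.mem_cons.mp h3 with he | hm
    · omega
    · exact (List.pairwise_cons.mp hp).1 _ hm
  omega

theorem loopA_cons (x : Int) (t : List Int) (K ans : Int) :
    loopA (x :: t) K ans = (if x < K then
      (if (x :: t).length == 1 then (-1)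
       else loopA (heappush (heappop (heappop (x :: t)).2).2
         ((heappop (x :: t)).1 + (heappop (heappop (x :: t)).2).1 * 2)) K (ans + 1))
      else ans) := by
  rw [loopA]

theorem loopB_cons (x : Int) (t : List Int) (K m : Int) :
    loopB (x :: t) K m = (if x < K then
      (if (x :: t).length == 1 then (-1)
       else loopB (((x :: t).drop 2).insertIdx
         (bsearchLoop ((x :: t).drop 2) ((x :: t).getD 0 0 + 2 * (x :: t).getD 1 0) 0
           ((x :: t).drop 2).length)
         ((x :: t).getD 0 0 + 2 * (x :: t).getD 1 0)) K (m + 1))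
      else m) := by
  rw [loopB]

theorem loopA_nil (K ans : Int) : loopA [] K ans = 0 := by rw [loopA]

theorem loopB_nil (K m : Int) : loopB [] K m = 0 := by rw [loopB]

theorem loop_eq : ∀ (k : Nat) (h l : List Int) (K ans : Int), h.length ≤ k → IsHeap h →
    l.Pairwise (· ≤ ·) → h.Perm l → loopA h K ans = loopB l K ans := by
  intro k
  induction k with
  | zero =>
    intro h l K ans hk _ _ hP
    have h0 : h = [] := by
      cases h with
      | nil => rfl
      | cons a t => simp at hk
    subst h0
    have l0 : l = [] := by
      have h5 : l.length = 0 := by simpa using hP.length_eq.symm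
      exact List.eq_nil_of_length_eq_zero h5
    subst l0
    rw [loopA_nil, loopB_nil]
  | succ k ih =>
    intro h l K ans hk hH hp hP
    cases h with
    | nil =>
      have l0 : l = [] := by
        have h5 : l.length = 0 := by simpa using hP.length_eq.symm
        exact List.eq_nil_of_length_eq_zero h5
      subst l0
      rw [loopA_nil, loopB_nil]
    | cons a t =>
      cases l with
      | nil => exact absurd hP.length_eq (by simp)
      | cons b lt =>
        have hab : a = b := by
          have := min_match (a :: t) b lt hH hP hp
          simpa using this
        subst hab
        rw [loopA_cons, loopB_cons]
        by_cases hK : a < K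
        · rw [if_pos hK, if_pos hK]
          have hlen := hP.length_eq
          simp only [List.length_cons] at hlen
          by_cases ht : t = []
          · subst ht
            have hlt : lt = [] := by
              have h5 : lt.length = 0 := by simpa using hlen.symm
              exact List.eq_nil_of_length_eq_zero h5
            subst hlt
            rw [if_pos (by simp), if_pos (by simp)]
          · have htpos : 0 < t.length := List.length_pos_of_ne_nil ht
            have hg1 : ¬ ((a :: t).length == 1) = true := by
              simp only [beq_iff_eq, List.length_cons]; omega
            have hg2 : ¬ ((a :: lt).length == 1) = true := by
              simp only [beq_iff_eq, List.length_cons]; omega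
            rw [if_neg hg1, if_neg hg2]
            -- first pop
            obtain ⟨hf1, hH1, hP1⟩ := heappop_spec (a :: t) hH (List.cons_ne_nil a t)
            have hf1a : (heappop (a :: t)).1 = a := by simpa using hf1
            have hperm1 : (heappop (a :: t)).2.Perm lt := by
              have := hP1
              rw [hf1a] at this
              exact (this.symm.trans hP).cons_inv
            -- lt = c :: lt2
            have hltne : lt ≠ [] := by
              intro hcon
              subst hcon
              simp only [List.length_nil] at hlen
              omega
            obtain ⟨c, lt2, rfl⟩ := List.exists_cons_of_ne_nil hltne
            -- second pop
            have hpop2ne : (heappop (a :: t)).2 ≠ [] := by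
              have := hperm1.length_eq
              intro hcon
              rw [hcon] at this
              simp at this
            obtain ⟨hf2, hH2, hP2⟩ := heappop_spec _ hH1 hpop2ne
            have hpw1 : (c :: lt2).Pairwise (· ≤ ·) := (List.pairwise_cons.mp hp).2
            have hf2c : (heappop (heappop (a :: t)).2).1 = c := by
              rw [hf2]
              exact min_match _ c lt2 hH1 hperm1 hpw1
            have hperm2 : (heappop (heappop (a :: t)).2).2.Perm lt2 := by
              have h4 := hP2
              rw [hf2] at h4
              rw [min_match _ c lt2 hH1 hperm1 hpw1] at h4
              exact (h4.symm.trans hperm1).cons_inv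
            -- push
            rw [hf1a, hf2c]
            have hval : a + c * 2 = a + 2 * c := by ring
            rw [hval]
            obtain ⟨hH3, hP3⟩ := heappush_spec _ (a + 2 * c) hH2
            -- B side bookkeeping
            have hd2 : (a :: c :: lt2).drop 2 = lt2 := rfl
            have hg0 : (a :: c :: lt2).getD 0 0 = a := rfl
            have hg1' : (a :: c :: lt2).getD 1 0 = c := rfl
            rw [hd2, hg0, hg1']
            have hpw2 : lt2.Pairwise (· ≤ ·) := (List.pairwise_cons.mp hpw1).2
            obtain ⟨hb1, hb2⟩ := bsearchLoop_spec lt2 (a + 2 * c) hpw2 lt2.length 0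
              lt2.length (by omega) (Nat.zero_le _) (le_refl _)
              (fun i hi => absurd hi (Nat.not_lt_zero i))
              (fun i h1 h2 => absurd h2 (by omega))
            have hr_le : bsearchLoop lt2 (a + 2 * c) 0 lt2.length ≤ lt2.length :=
              bsearchLoop_le _ _ _ _ (Nat.zero_le _)
            obtain ⟨hpw', hperm'⟩ := insertIdx_sorted_perm lt2 (a + 2 * c)
              (bsearchLoop lt2 (a + 2 * c) 0 lt2.length) hr_le hb1 hb2 hpw2
            -- recurse
            apply ih
            · simp only [length_heappush, length_heappop, List.length_cons] at hk ⊢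
              omega
            · exact hH3
            · exact hpw'
            · exact (hP3.trans (hperm2.cons _)).trans hperm'.symm
        · rw [if_neg hK, if_neg hK]


theorem heapify_spec : ∀ (xs acc : List Int), IsHeap acc →
    IsHeap (xs.foldl (fun h sco => heappush h sco) acc) ∧
    (xs.foldl (fun h sco => heappush h sco) acc).Perm (acc ++ xs) := by
  intro xs
  induction xs with
  | nil => intro acc h; exact ⟨h, by simp⟩
  | cons x xs ih =>
    intro acc h
    obtain ⟨h1, h2⟩ := heappush_spec acc x h
    obtain ⟨h3, h4⟩ := ih (heappush acc x) h1
    exact ⟨h3, h4.trans ((h2.append_right xs).trans List.perm_middle.symm)⟩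

-- ===== VERDICT (by name: the statement is the Claim_ definition above) =====
theorem solution_spec : Claim_equal_solution := by
  intro scoville K _hdom _hpre
  unfold Spec_solution solution solution_alt
  simp only
  obtain ⟨hH, hP⟩ := heapify_spec scoville [] (by intro i c hc _; simp at hc)
  have hsp : (PySem.List.sorted scoville (fun x => x) false).Perm scoville :=
    PySem.List.sorted_perm scoville (fun x => x) false
  have hpw : (PySem.List.sorted scoville (fun x => x) false).Pairwise (· ≤ ·) := by
    simpa using PySem.List.sorted_pairwise (xs := scoville) (key := fun x => x)
  exact loop_eq _ _ _ K 0 (Nat.le_refl _) hH hpw ((hP.trans (by simp)).trans hsp.symm)
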